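-- pv_equiv track=rewrite | github.com/CedricDaGoat/ProjetGMD | meddra_indexer.py | rechercher_medicaments_indic_meddra
-- ===== SOURCE A (Python) =====
-- def rechercher_medicaments_indic_meddra(symptomes, index, logique='OU'):
--     """
--     Recherche des médicaments en fonction des symptômes donnés, avec une option 'ET' ou 'OU'.
--
--     Args:
--         symptomes (list): Liste des symptômes à rechercher.
--         index (dict): Index des symptômes aux médicaments.
--         logique (str): 'ET' si tous les symptômes doivent être présents, 'OU' si seulement une partie.
--
--     Returns:
--         list: Liste des noms des médicaments correspondant à la recherche.
--     """
--     if not symptomes:  # Vérifie si la liste des symptômes est vide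
--         return []
--
--     # Récupérer la liste des sets de médicaments associés à chaque symptôme
--     medicaments_par_symptome = [index.get(symptome, set()) for symptome in symptomes]
--
--     # Supprimer les ensembles vides (pour éviter les problèmes avec l'intersection)
--     medicaments_par_symptome = [med for med in medicaments_par_symptome if med]
--
--     if not medicaments_par_symptome:  # Si aucun symptôme n'a donné de médicaments
--         return []
--
--     # Cas 'ET' : Trouver l'intersection de tous les médicaments (médicaments communs à tous les symptômes)
--     if logique == 'ET':
--         resultats = set.intersection(*medicaments_par_symptome)
--     # Cas 'OU' : Trouver l'union de tous les médicaments (médicaments liés à au moins un symptôme)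
--     else:
--         resultats = set.union(*medicaments_par_symptome)
--
--     # EXTRAIRE UNIQUEMENT LES NOMS DES MÉDICAMENTS
--     return sorted({nom for _, nom in resultats})
-- ===== SOURCE B (Python) =====
-- def rechercher_medicaments_indic_meddra(symptomes, index, logique='OU'):
--     if not symptomes:
--         return []
--
--     # non-empty medication sets, one per symptom that has an index entry
--     sets = [s for s in (index.get(symptome, set()) for symptome in symptomes) if s]
--     if not sets:
--         return []
--
--     # single counting pass: how many of the surviving sets contain each element
--     counts = {}
--     for s in sets:
--         for elt in s:
--             counts[elt] = counts.get(elt, 0) + 1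
--
--     # 'ET' = element must occur in every surviving set; 'OU' = in at least one
--     threshold = len(sets) if logique == 'ET' else 1
--     noms = {nom for (_, nom), c in counts.items() if c >= threshold}
--     return sorted(noms)
-- ===== Notes on version B (the rewrite author's own statement) =====
-- stated objective: alternative
-- what changed: Replaces A's fold of set.intersection/set.union over the per-symptom sets by a single counting pass (an occurrence-count dict over all surviving sets) followed by a threshold filter (threshold = number of surviving sets for 'ET', 1 otherwise).
import Mathlib
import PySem

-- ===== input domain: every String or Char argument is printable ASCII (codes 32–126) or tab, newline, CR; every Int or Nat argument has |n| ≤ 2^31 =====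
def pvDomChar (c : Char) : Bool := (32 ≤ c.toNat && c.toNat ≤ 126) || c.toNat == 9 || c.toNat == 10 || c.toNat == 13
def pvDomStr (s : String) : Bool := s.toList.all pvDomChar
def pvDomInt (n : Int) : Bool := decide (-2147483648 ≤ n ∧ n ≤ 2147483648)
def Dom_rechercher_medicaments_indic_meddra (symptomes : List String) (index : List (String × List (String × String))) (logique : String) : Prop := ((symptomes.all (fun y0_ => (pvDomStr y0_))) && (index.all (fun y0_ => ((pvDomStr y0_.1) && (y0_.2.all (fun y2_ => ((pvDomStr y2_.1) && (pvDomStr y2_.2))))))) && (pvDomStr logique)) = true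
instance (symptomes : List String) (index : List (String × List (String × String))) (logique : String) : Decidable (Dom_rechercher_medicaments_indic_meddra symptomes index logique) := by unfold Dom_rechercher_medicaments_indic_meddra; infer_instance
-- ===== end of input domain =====

-- B replaces A's set.intersection/set.union over the per-symptom sets by one counting
-- pass (a dict of occurrence counts) plus a threshold filter, avoiding the intermediate
-- set built at each fold step; objective: alternative algorithm, no speed claim.

-- ===== PORT A =====
-- index.get(symptome, set()) on the assoc list: first match, default empty set
def rechercher_medicaments_indic_meddra (symptomes : List String) (index : List (String × List (String × String))) (logique : String) : List String :=
  if symptomes = [] then []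
  else
    let medicamentsParSymptome0 :=
      symptomes.map (fun symptome => PySem.Set.ofList ((index.lookup symptome).getD []))
    let medicamentsParSymptome := medicamentsParSymptome0.filter (fun med => !med.isEmpty)
    match medicamentsParSymptome with
    | [] => []
    | m :: rest =>
      let resultats :=
        if logique = "ET" then rest.foldl (fun acc s => PySem.Set.inter acc s) m
        else rest.foldl (fun acc s => PySem.Set.union acc s) m
      PySem.List.sorted (PySem.Set.ofList (resultats.map (fun p => p.2))) (fun x => x) false

-- ===== PORT B =====
def rechercher_medicaments_indic_meddra_alt (symptomes : List String) (index : List (String × List (String × String))) (logique : String) : List String :=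
  if symptomes = [] then []
  else
    let sets :=
      (symptomes.map (fun symptome => PySem.Set.ofList ((index.lookup symptome).getD []))).filter
        (fun s => !s.isEmpty)
    if sets = [] then []
    else
      let counts :=
        sets.foldl (fun d s => s.foldl (fun d x => PySem.Dict.modify d x 0 (· + 1)) d) PySem.Dict.empty
      let threshold : Int := if logique = "ET" then (sets.length : Int) else 1
      PySem.List.sorted
        (PySem.Set.ofList (((PySem.Dict.items counts).filter (fun p => threshold ≤ p.2)).map (fun p => p.1.2)))
        (fun x => x) false

-- ===== PRECONDITION & SPEC =====
def Spec_rechercher_medicaments_indic_meddra (symptomes : List String) (index : List (String × List (String × String))) (logique : String) (out : List String) : Prop := out = rechercher_medicaments_indic_meddra_alt symptomes index logique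
instance (symptomes : List String) (index : List (String × List (String × String))) (logique : String) (out : List String) : Decidable (Spec_rechercher_medicaments_indic_meddra symptomes index logique out) := by unfold Spec_rechercher_medicaments_indic_meddra; infer_instance

-- ===== CLAIM (what is proved, stated in full; the proofs are below) =====
def Claim_equal_rechercher_medicaments_indic_meddra : Prop := ∀ (symptomes : List String) (index : List (String × List (String × String))) (logique : String), Dom_rechercher_medicaments_indic_meddra symptomes index logique → Spec_rechercher_medicaments_indic_meddra symptomes index logique (rechercher_medicaments_indic_meddra symptomes index logique)

-- ===== LEMMAS AND PROOFS =====

-- membership in A's intersection fold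
lemma mem_foldl_inter {α : Type} [BEq α] [LawfulBEq α] (t : List (List α)) (h : List α) (x : α) :
    x ∈ t.foldl (fun acc s => PySem.Set.inter acc s) h ↔ x ∈ h ∧ ∀ s ∈ t, x ∈ s := by
  induction t generalizing h with
  | nil => simp
  | cons s t ih => simp [ih, PySem.Set.mem_inter]; tauto

-- membership in A's union fold
lemma mem_foldl_union {α : Type} [BEq α] [LawfulBEq α] (t : List (List α)) (h : List α) (x : α) :
    x ∈ t.foldl (fun acc s => PySem.Set.union acc s) h ↔ x ∈ h ∨ ∃ s ∈ t, x ∈ s := by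
  induction t generalizing h with
  | nil => simp
  | cons s t ih => simp [ih, PySem.Set.mem_union]; tauto

-- counting across a flatten of duplicate-free lists counts the lists containing x
lemma count_flatten_nodup {α : Type} [BEq α] [LawfulBEq α] (L : List (List α)) (x : α)
    (hn : ∀ s ∈ L, s.Nodup) :
    L.flatten.count x = L.countP (fun s => s.contains x) := by
  induction L with
  | nil => rfl
  | cons s L ih =>
    have hs : s.Nodup := hn s (by simp)
    have hL : ∀ u ∈ L, u.Nodup := fun u hu => hn u (by simp [hu])
    rw [List.flatten_cons, List.count_append, List.countP_cons, ih hL]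
    by_cases hx : x ∈ s
    · rw [List.count_eq_one_of_mem hs hx]
      simp [hx]
      omega
    · rw [List.count_eq_zero_of_not_mem hx]
      simp [hx]

-- every surviving per-symptom set is duplicate-free
lemma nodup_of_mem_meds (symptomes : List String) (index : List (String × List (String × String)))
    (s : List (String × String))
    (hs : s ∈ (symptomes.map (fun symptome => PySem.Set.ofList ((index.lookup symptome).getD []))).filter
        (fun s => !s.isEmpty)) : s.Nodup := by
  have := List.mem_filter.mp hs |>.1
  obtain ⟨sym, _, rfl⟩ := List.mem_of_mem_filter hs |> List.mem_map.mp
  exact PySem.Set.nodup_ofList _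


-- the heart of the equivalence: on the surviving non-empty sets, A's fold of
-- intersections/unions selects exactly the elements whose occurrence count reaches
-- B's threshold
lemma core_eq (m : List (String × String)) (rest : List (List (String × String))) (logique : String)
    (hnod : ∀ s ∈ m :: rest, s.Nodup) :
    PySem.List.sorted (PySem.Set.ofList
        ((if logique = "ET" then rest.foldl (fun acc s => PySem.Set.inter acc s) m
          else rest.foldl (fun acc s => PySem.Set.union acc s) m).map (fun p => p.2)))
      (fun x => x) false
    =
    PySem.List.sorted (PySem.Set.ofList
        (((PySem.Dict.items ((m :: rest).foldl
              (fun d s => s.foldl (fun d x => PySem.Dict.modify d x 0 (· + 1)) d) PySem.Dict.empty)).filter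
            (fun p => (if logique = "ET" then (((m :: rest).length : Nat) : Int) else 1) ≤ p.2)).map
          (fun p => p.1.2)))
      (fun x => x) false := by
  have hcounts : (m :: rest).foldl (fun d s => s.foldl (fun d x => PySem.Dict.modify d x 0 (· + 1)) d) (PySem.Dict.empty : PySem.Dict (String × String) Int)
      = ((m :: rest).flatten).foldl (fun d x => PySem.Dict.modify d x 0 (· + 1)) PySem.Dict.empty :=
    List.foldl_flatten.symm
  have hkeys : (((m :: rest).flatten).foldl (fun d x => PySem.Dict.modify d x 0 (· + 1)) (PySem.Dict.empty : PySem.Dict (String × String) Int)).keys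
      = PySem.Set.ofList ((m :: rest).flatten) := by
    rw [PySem.Dict.keys_foldl_modify]
    rfl
  have hgetD : ∀ k, (((m :: rest).flatten).foldl (fun d x => PySem.Dict.modify d x 0 (· + 1)) (PySem.Dict.empty : PySem.Dict (String × String) Int)).getD k 0
      = (((m :: rest).flatten).count k : Int) := by
    intro k
    rw [PySem.Dict.getD_foldl_modify_add_one]
    simp [PySem.Dict.getD, PySem.Dict.get?, PySem.Dict.empty]
  have hitems : (((m :: rest).flatten).foldl (fun d x => PySem.Dict.modify d x 0 (· + 1)) (PySem.Dict.empty : PySem.Dict (String × String) Int)).items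
      = (PySem.Set.ofList ((m :: rest).flatten)).map (fun k => (k, (((m :: rest).flatten).count k : Int))) := by
    rw [PySem.Dict.items_eq_map_keys _ (by rw [hkeys]; exact PySem.Set.nodup_ofList _) 0, hkeys]
    exact List.map_congr_left (fun k _ => by rw [hgetD k])
  rw [hcounts, hitems, List.filter_map, List.map_map]
  simp only [Function.comp_def]
  -- both sides are sorted(set(...)); it suffices that the members agree
  rw [PySem.List.sorted_id_eq_sorted_id_iff_perm]
  apply (List.perm_ext_iff_of_nodup (PySem.Set.nodup_ofList _) (PySem.Set.nodup_ofList _)).mpr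
  intro nom
  rw [PySem.Set.mem_ofList, PySem.Set.mem_ofList, List.mem_map, List.mem_map]
  have hcontains : ∀ (k : String × String) (s : List (String × String)), s.contains k = true ↔ k ∈ s := by
    intro k s; exact List.contains_iff_mem
  have hmemflat : ∀ k : String × String, k ∈ (m :: rest).flatten ↔ ∃ s ∈ m :: rest, k ∈ s :=
    fun k => List.mem_flatten
  have hcount : ∀ k : String × String,
      ((m :: rest).flatten).count k = (m :: rest).countP (fun s => s.contains k) :=
    fun k => count_flatten_nodup (m :: rest) k hnod
  have key : ∀ k : String × String,
      (k ∈ (if logique = "ET" then rest.foldl (fun acc s => PySem.Set.inter acc s) m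
            else rest.foldl (fun acc s => PySem.Set.union acc s) m))
      ↔ k ∈ (PySem.Set.ofList ((m :: rest).flatten)).filter
            (fun k => decide ((if logique = "ET" then (((m :: rest).length : Nat) : Int) else 1)
              ≤ (k, (((m :: rest).flatten).count k : Int)).2)) := by
    intro k
    rw [List.mem_filter, PySem.Set.mem_ofList]
    simp only [decide_eq_true_eq]
    by_cases hlog : logique = "ET"
    · simp only [hlog, reduceIte]
      rw [mem_foldl_inter]
      constructor
      · rintro ⟨hkm, hrest⟩
        have hall : ∀ s ∈ m :: rest, k ∈ s := by
          intro s hs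
          rcases List.mem_cons.mp hs with h | h
          · exact h ▸ hkm
          · exact hrest s h
        refine ⟨(hmemflat k).mpr ⟨m, List.mem_cons_self, hkm⟩, ?_⟩
        have := List.countP_eq_length.mpr (fun s hs => (hcontains k s).mpr (hall s hs))
        rw [hcount k, this]
      · rintro ⟨hkf, hge⟩
        rw [hcount k] at hge
        have hle := List.countP_le_length (p := fun s => s.contains k) (l := m :: rest)
        have heq : (m :: rest).countP (fun s => s.contains k) = (m :: rest).length := by omega
        have hall := List.countP_eq_length.mp heq
        exact ⟨(hcontains k m).mp (hall m List.mem_cons_self),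
          fun s hs => (hcontains k s).mp (hall s (List.mem_cons_of_mem _ hs))⟩
    · simp only [if_neg hlog]
      rw [mem_foldl_union]
      constructor
      · intro h
        have hkf : k ∈ (m :: rest).flatten := by
          rcases h with h | ⟨s, hs, hks⟩
          · exact (hmemflat k).mpr ⟨m, List.mem_cons_self, h⟩
          · exact (hmemflat k).mpr ⟨s, List.mem_cons_of_mem _ hs, hks⟩
        have hpos := List.count_pos_iff.mpr hkf
        exact ⟨hkf, by omega⟩
      · rintro ⟨hkf, -⟩
        obtain ⟨s, hsL, hks⟩ := (hmemflat k).mp hkf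
        rcases List.mem_cons.mp hsL with h | h
        · exact Or.inl (h ▸ hks)
        · exact Or.inr ⟨s, h, hks⟩
  constructor
  · rintro ⟨k, hk, rfl⟩
    exact ⟨k, (key k).mp hk, rfl⟩
  · rintro ⟨k, hk, rfl⟩
    exact ⟨k, (key k).mpr hk, rfl⟩

-- ===== VERDICT (by name: the statement is the Claim_ definition above) =====
theorem rechercher_medicaments_indic_meddra_spec : Claim_equal_rechercher_medicaments_indic_meddra := by
  intro symptomes index logique _
  unfold Spec_rechercher_medicaments_indic_meddra
  unfold rechercher_medicaments_indic_meddra rechercher_medicaments_indic_meddra_alt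
  by_cases h0 : symptomes = []
  · simp [h0]
  simp only [if_neg h0]
  have hnod : ∀ s ∈ (symptomes.map (fun symptome => PySem.Set.ofList ((index.lookup symptome).getD []))).filter
      (fun s => !s.isEmpty), s.Nodup := fun s hs => nodup_of_mem_meds symptomes index s hs
  cases hm : (symptomes.map (fun symptome => PySem.Set.ofList ((index.lookup symptome).getD []))).filter
      (fun s => !s.isEmpty) with
  | nil => simp
  | cons m rest =>
    rw [if_neg (List.cons_ne_nil _ _)]
    exact core_eq m rest logique (hm ▸ hnod)
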